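-- pv_equiv track=rewrite | github.com/LucasMagnum/coding-challenges | python/daily_interview_pro/2020/11/14.py | num_kaprekar_iterations
-- ===== SOURCE A (Python) =====
-- KAPREKAR_CONSTANT = 6174
--
-- def num_kaprekar_iterations(n):
--     if n == KAPREKAR_CONSTANT:
--         return 0
--
--     n_str = str(n)
--     asc_num = int("".join(sorted(n_str)))
--     desc_num =  int("".join(sorted(n_str.zfill(4), reverse=True)))
--
--     new_num = desc_num - asc_num
--     return num_kaprekar_iterations(new_num) + 1
-- ===== SOURCE B (Python) =====
-- KAPREKAR_CONSTANT = 6174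
--
-- def num_kaprekar_iterations(n):
--     count = 0
--     while n != KAPREKAR_CONSTANT:
--         d = sorted((n // 1000 % 10, n // 100 % 10, n // 10 % 10, n % 10))
--         asc = d[0] * 1000 + d[1] * 100 + d[2] * 10 + d[3]
--         desc = d[3] * 1000 + d[2] * 100 + d[1] * 10 + d[0]
--         n = desc - asc
--         count += 1
--     return count
-- ===== Notes on version B (the rewrite author's own statement) =====
-- stated objective: alternative
-- what changed: replaces the recursive string-sort-and-reparse step with an iterative loop that extracts the four digits arithmetically, sorts them once as numbers and rebuilds asc/desc from positional weights
-- outside the precondition, e.g. on num_kaprekar_iterations(1111): A raises RecursionError, B does not finish within the time limit; on num_kaprekar_iterations(0): A raises RecursionError, B does not finish within the time limit; on num_kaprekar_iterations(10000): A raises RecursionError, B does not finish within the time limit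
import Mathlib
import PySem

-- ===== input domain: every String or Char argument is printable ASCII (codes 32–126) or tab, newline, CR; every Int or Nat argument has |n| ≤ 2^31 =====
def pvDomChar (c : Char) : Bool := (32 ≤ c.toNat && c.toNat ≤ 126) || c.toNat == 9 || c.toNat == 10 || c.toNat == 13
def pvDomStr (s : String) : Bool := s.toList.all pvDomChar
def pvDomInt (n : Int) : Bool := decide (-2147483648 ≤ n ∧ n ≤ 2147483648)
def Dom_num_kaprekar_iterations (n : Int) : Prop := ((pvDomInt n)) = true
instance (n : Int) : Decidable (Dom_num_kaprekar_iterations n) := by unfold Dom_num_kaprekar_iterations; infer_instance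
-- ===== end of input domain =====

-- B replaces A's recursive string-sort-and-reparse step by an iterative loop doing pure
-- digit arithmetic; equivalence is proved on the inputs where A terminates.

-- ===== PORT A =====
def KAPREKAR_CONSTANT : Int := 6174

-- literal port of A's recursion; the fuel only makes the recursion total: on every
-- input admitted by Pre_ the Python recursion ends after at most 7 calls (fuel 8 is never hit)
def kapA : Nat → Int → Int
  | 0, _ => 0
  | fuel+1, n =>
    if n = KAPREKAR_CONSTANT then 0
    else
      let nStr := PySem.Int.toChars n
      let ascNum := (PySem.Int.ofChars? (PySem.List.sorted nStr (fun c => c) false)).getD 0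
      let descNum := (PySem.Int.ofChars? (PySem.List.sorted (PySem.Chars.zfill nStr 4) (fun c => c) true)).getD 0
      let newNum := descNum - ascNum
      kapA fuel newNum + 1

def num_kaprekar_iterations (n : Int) : Int := kapA 8 n

-- ===== PORT B =====
-- literal port of Source B's while-loop (fuel makes the loop total; never hit inside Pre_)
def loopB : Nat → Int → Int → Int
  | 0, _, count => count
  | fuel+1, n, count =>
    if n = KAPREKAR_CONSTANT then count
    else
      let ds := PySem.List.sorted
        [PySem.Int.mod (PySem.Int.floordiv n 1000) 10,
         PySem.Int.mod (PySem.Int.floordiv n 100) 10,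
         PySem.Int.mod (PySem.Int.floordiv n 10) 10,
         PySem.Int.mod n 10] (fun x => x) false
      let asc := PySem.List.pyGetD ds 0 0 * 1000 + PySem.List.pyGetD ds 1 0 * 100 +
                 PySem.List.pyGetD ds 2 0 * 10 + PySem.List.pyGetD ds 3 0
      let desc := PySem.List.pyGetD ds 3 0 * 1000 + PySem.List.pyGetD ds 2 0 * 100 +
                  PySem.List.pyGetD ds 1 0 * 10 + PySem.List.pyGetD ds 0 0
      loopB fuel (desc - asc) (count + 1)

def num_kaprekar_iterations_alt (n : Int) : Int := loopB 8 n 0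

-- ===== PRECONDITION & SPEC =====
-- Pre_ excludes exactly the inputs on which A raises: negative n (ValueError while parsing
-- the sorted string containing '-'), and n ≥ 10000 or a multiple of 1111 (the routine never
-- reaches Kaprekar's constant from those, so A's recursion raises RecursionError).
def Pre_num_kaprekar_iterations (n : Int) : Prop :=
  0 ≤ n ∧ n ≤ 9999 ∧ PySem.Int.mod n 1111 ≠ 0
instance (n : Int) : Decidable (Pre_num_kaprekar_iterations n) := by
  unfold Pre_num_kaprekar_iterations; infer_instance
def pvWitness_num_kaprekar_iterations : Int := 1234

def Spec_num_kaprekar_iterations (n : Int) (out : Int) : Prop := out = num_kaprekar_iterations_alt n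
instance (n : Int) (out : Int) : Decidable (Spec_num_kaprekar_iterations n out) := by
  unfold Spec_num_kaprekar_iterations; infer_instance

-- ===== CLAIM =====
def Claim_equal_num_kaprekar_iterations : Prop :=
  ∀ (n : Int), Dom_num_kaprekar_iterations n → Pre_num_kaprekar_iterations n →
    Spec_num_kaprekar_iterations n (num_kaprekar_iterations n)

-- ===== LEMMAS AND PROOFS =====

-- the digit list of m (thousands first) and its ascending sort
def pvDigits (m : Nat) : List Nat := [m / 1000 % 10, m / 100 % 10, m / 10 % 10, m % 10]
def pvSorted (m : Nat) : List Nat := PySem.List.sorted (pvDigits m) (fun x => x) false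
def pvPad (m : Nat) : Nat := if m < 10 then 3 else if m < 100 then 2 else if m < 1000 then 1 else 0

-- A's one step / B's one step, for proof bookkeeping (definitionally the bodies above)
def stepA (n : Int) : Int :=
  (PySem.Int.ofChars? (PySem.List.sorted (PySem.Chars.zfill (PySem.Int.toChars n) 4) (fun c => c) true)).getD 0
  - (PySem.Int.ofChars? (PySem.List.sorted (PySem.Int.toChars n) (fun c => c) false)).getD 0
def stepB (n : Int) : Int :=
  let ds := PySem.List.sorted
    [PySem.Int.mod (PySem.Int.floordiv n 1000) 10,
     PySem.Int.mod (PySem.Int.floordiv n 100) 10,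
     PySem.Int.mod (PySem.Int.floordiv n 10) 10,
     PySem.Int.mod n 10] (fun x => x) false
  (PySem.List.pyGetD ds 3 0 * 1000 + PySem.List.pyGetD ds 2 0 * 100 +
   PySem.List.pyGetD ds 1 0 * 10 + PySem.List.pyGetD ds 0 0)
  - (PySem.List.pyGetD ds 0 0 * 1000 + PySem.List.pyGetD ds 1 0 * 100 +
     PySem.List.pyGetD ds 2 0 * 10 + PySem.List.pyGetD ds 3 0)

theorem kapA_succ (fuel : Nat) (n : Int) :
    kapA (fuel+1) n = if n = KAPREKAR_CONSTANT then 0 else kapA fuel (stepA n) + 1 := rfl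
theorem loopB_succ (fuel : Nat) (n c : Int) :
    loopB (fuel+1) n c = if n = KAPREKAR_CONSTANT then c else loopB fuel (stepB n) (c + 1) := rfl

-- bounded-scan reflection (tail recursive so the kernel can evaluate it at 10000)
def pvScan (p : Nat → Bool) : Nat → Bool
  | 0 => true
  | m+1 => if p m then pvScan p m else false

theorem pvScan_sound (p : Nat → Bool) : ∀ k, pvScan p k = true → ∀ m, m < k → p m = true := by
  intro k
  induction k with
  | zero => intro _ m hm; omega
  | succ k ih =>
    intro h m hm
    by_cases hp : p k = true
    · simp [pvScan, hp] at h
      rcases Nat.lt_succ_iff_lt_or_eq.mp hm with h' | h'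
      · exact ih h m h'
      · simpa [h'] using hp
    · simp [pvScan, hp] at h

-- ===== decided facts (kernel-evaluated scans) =====

-- str(n): characterization of toChars on [0,10000)
def pvT (m : Nat) : Bool :=
  PySem.Int.toChars (m : Int) == ((pvDigits m).drop (pvPad m)).map Nat.digitChar

set_option maxRecDepth 100000 in
set_option maxHeartbeats 2000000 in
theorem pvT_holds : ∀ m, m < 10000 → pvT m = true :=
  pvScan_sound pvT 10000 (by decide)

-- parse of a nondecreasing digit word of each length (with value), stated over its value
def pvAsc4 (v : Nat) : Bool :=
  !(v/1000%10 ≤ v/100%10 && v/100%10 ≤ v/10%10 && v/10%10 ≤ v%10) ||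
  PySem.Int.ofChars? ((pvDigits v).map Nat.digitChar) == some (v : Int)
def pvAsc3 (v : Nat) : Bool :=
  !(v/100%10 ≤ v/10%10 && v/10%10 ≤ v%10) ||
  PySem.Int.ofChars? ([v/100%10, v/10%10, v%10].map Nat.digitChar) == some (v : Int)
def pvAsc2 (v : Nat) : Bool :=
  !(v/10%10 ≤ v%10) ||
  PySem.Int.ofChars? ([v/10%10, v%10].map Nat.digitChar) == some (v : Int)
def pvAsc1 (v : Nat) : Bool :=
  PySem.Int.ofChars? ([v%10].map Nat.digitChar) == some (v : Int)
def pvDesc4 (v : Nat) : Bool :=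
  !(v%10 ≤ v/10%10 && v/10%10 ≤ v/100%10 && v/100%10 ≤ v/1000%10) ||
  PySem.Int.ofChars? ((pvDigits v).map Nat.digitChar) == some (v : Int)

set_option maxRecDepth 100000 in
set_option maxHeartbeats 2000000 in
theorem pvAsc4_holds : ∀ v, v < 10000 → pvAsc4 v = true :=
  pvScan_sound pvAsc4 10000 (by decide)
set_option maxRecDepth 100000 in
set_option maxHeartbeats 2000000 in
theorem pvAsc3_holds : ∀ v, v < 1000 → pvAsc3 v = true :=
  pvScan_sound pvAsc3 1000 (by decide)
set_option maxRecDepth 100000 in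
set_option maxHeartbeats 2000000 in
theorem pvAsc2_holds : ∀ v, v < 100 → pvAsc2 v = true :=
  pvScan_sound pvAsc2 100 (by decide)
set_option maxRecDepth 100000 in
set_option maxHeartbeats 2000000 in
theorem pvAsc1_holds : ∀ v, v < 10 → pvAsc1 v = true :=
  pvScan_sound pvAsc1 10 (by decide)
set_option maxRecDepth 100000 in
set_option maxHeartbeats 2000000 in
theorem pvDesc4_holds : ∀ v, v < 10000 → pvDesc4 v = true :=
  pvScan_sound pvDesc4 10000 (by decide)

-- digitChar is order-compatible below 10, and never a sign character
theorem pvDigitChar_lt : ∀ x, x < 10 → ∀ y, y < 10 → (Nat.digitChar x < Nat.digitChar y ↔ x < y) := by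
  decide
theorem pvDigitChar_ne_sign : ∀ x, x < 10 → Nat.digitChar x ≠ '+' ∧ Nat.digitChar x ≠ '-' := by
  decide

-- ===== symbolic sorting lemmas =====

-- a sort commutes with mapping an order-compatible function
theorem pvSorted_map_comm {χ : Type} [LinearOrder χ] (f : Nat → χ) (w : List Nat) (rev : Bool)
    (hf : ∀ x ∈ w, ∀ y ∈ w, (f x < f y ↔ x < y)) :
    PySem.List.sorted (w.map f) (fun c => c) rev = (PySem.List.sorted w (fun x => x) rev).map f := by
  cases rev with
  | false =>
    apply List.Perm.eq_of_pairwise (le := (· ≤ ·))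
      (fun a b _ _ h1 h2 => le_antisymm h1 h2)
    · exact PySem.List.sorted_pairwise _ _
    · rw [List.pairwise_map]
      refine (PySem.List.sorted_pairwise w (fun x => x)).imp_of_mem ?_
      intro a b ha hb hab
      have ha' := (PySem.List.mem_sorted w (fun x => x) false a).mp ha
      have hb' := (PySem.List.mem_sorted w (fun x => x) false b).mp hb
      by_contra hlt
      exact absurd ((hf b hb' a ha').mp (lt_of_not_ge hlt)) (by omega)
    · exact (PySem.List.sorted_perm _ _ _).trans ((PySem.List.sorted_perm w _ false).map f).symm
  | true =>
    apply List.Perm.eq_of_pairwise (le := fun a b => b ≤ a)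
      (fun a b _ _ h1 h2 => le_antisymm h2 h1)
    · exact PySem.List.sorted_pairwise_rev _ _
    · rw [List.pairwise_map]
      refine (PySem.List.sorted_pairwise_rev w (fun x => x)).imp_of_mem ?_
      intro a b ha hb hab
      have ha' := (PySem.List.mem_sorted w (fun x => x) true a).mp ha
      have hb' := (PySem.List.mem_sorted w (fun x => x) true b).mp hb
      by_contra hlt
      exact absurd ((hf a ha' b hb').mp (lt_of_not_ge hlt)) (by omega)
    · exact (PySem.List.sorted_perm _ _ _).trans ((PySem.List.sorted_perm w _ true).map f).symm

-- the unique nonincreasing arrangement names sorted(xs, reverse=True)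
theorem pvSorted_rev_eq_of_perm {κ : Type} [LinearOrder κ] (xs ys : List κ)
    (hp : ys.Perm xs) (hs : ys.Pairwise (fun a b => b ≤ a)) :
    PySem.List.sorted xs (fun x => x) true = ys := by
  apply List.Perm.eq_of_pairwise (le := fun a b => b ≤ a)
    (fun a b _ _ h1 h2 => le_antisymm h2 h1)
  · exact PySem.List.sorted_pairwise_rev _ _
  · exact hs
  · exact (PySem.List.sorted_perm xs _ true).trans hp.symm

-- digit extraction from a 4-digit value
theorem pvDigits_of_bounds (x0 x1 x2 x3 : Nat) (h0 : x0 < 10) (h1 : x1 < 10) (h2 : x2 < 10)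
    (h3 : x3 < 10) :
    (x0*1000 + x1*100 + x2*10 + x3) / 1000 % 10 = x0 ∧
    (x0*1000 + x1*100 + x2*10 + x3) / 100 % 10 = x1 ∧
    (x0*1000 + x1*100 + x2*10 + x3) / 10 % 10 = x2 ∧
    (x0*1000 + x1*100 + x2*10 + x3) % 10 = x3 := by
  omega

set_option maxRecDepth 8000 in
theorem pvStep_eq : ∀ m : Nat, m < 10000 →
    stepA (m : Int) = stepB (m : Int) ∧ 0 ≤ stepB (m : Int) ∧ stepB (m : Int) < 10000 := by
  intro m hm
  have hT : PySem.Int.toChars (m : Int) = ((pvDigits m).drop (pvPad m)).map Nat.digitChar := by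
    have h := pvT_holds m hm
    simpa [pvT] using h
  have hd : ∀ x ∈ pvDigits m, x < 10 := by
    intro x hx
    simp [pvDigits] at hx
    rcases hx with h|h|h|h <;> omega
  -- destructure the ascending digit sort
  have hlen : (pvSorted m).length = 4 := by
    rw [pvSorted, PySem.List.length_sorted]; rfl
  obtain ⟨e0, e1, e2, e3, hes⟩ : ∃ e0 e1 e2 e3, pvSorted m = [e0, e1, e2, e3] := by
    rcases hL : pvSorted m with _|⟨x0,_|⟨x1,_|⟨x2,_|⟨x3,_|⟨x4,r⟩⟩⟩⟩⟩ <;>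
      rw [hL] at hlen <;> simp at hlen
    exact ⟨x0, x1, x2, x3, rfl⟩
  have hperm : (pvSorted m).Perm (pvDigits m) := PySem.List.sorted_perm _ _ _
  have hmem : ∀ x ∈ [e0, e1, e2, e3], x < 10 := by
    intro x hx; exact hd x (hperm.mem_iff.mp (by rw [hes]; exact hx))
  have he0 : e0 < 10 := hmem e0 (by simp)
  have he1 : e1 < 10 := hmem e1 (by simp)
  have he2 : e2 < 10 := hmem e2 (by simp)
  have he3 : e3 < 10 := hmem e3 (by simp)
  have hchain : e0 ≤ e1 ∧ e1 ≤ e2 ∧ e2 ≤ e3 := by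
    have hp := PySem.List.sorted_pairwise (pvDigits m) (fun x => x)
    rw [← pvSorted, hes] at hp
    simp [List.pairwise_cons] at hp
    omega
  -- the descending char sort and its parse
  have hrev : PySem.List.sorted (pvDigits m) (fun x => x) true = [e3, e2, e1, e0] := by
    apply pvSorted_rev_eq_of_perm
    · simpa using (List.reverse_perm [e0, e1, e2, e3]).trans (hes ▸ hperm)
    · simp [List.pairwise_cons]; omega
  obtain ⟨g01, g12, g23⟩ := hchain
  obtain ⟨c1, c2, c3, c4⟩ := pvDigits_of_bounds e3 e2 e1 e0 he3 he2 he1 he0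
  have hparseD : PySem.Int.ofChars? ([e3, e2, e1, e0].map Nat.digitChar)
      = some ((e3*1000 + e2*100 + e1*10 + e0 : Nat) : Int) := by
    have h := pvDesc4_holds (e3*1000 + e2*100 + e1*10 + e0) (by omega)
    rw [pvDesc4] at h
    simp only [pvDigits] at h
    rw [c1, c2, c3, c4] at h
    simpa [g01, g12, g23] using h
  have hu10 : ∀ x ∈ (pvDigits m).drop (pvPad m), x < 10 := fun x hx => hd x (List.mem_of_mem_drop hx)
  have hascfold : PySem.List.sorted (PySem.Int.toChars (m : Int)) (fun c => c) false
      = (PySem.List.sorted ((pvDigits m).drop (pvPad m)) (fun x => x) false).map Nat.digitChar := by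
    rw [hT]
    exact pvSorted_map_comm Nat.digitChar _ false
      (fun x hx y hy => pvDigitChar_lt x (hu10 x hx) y (hu10 y hy))
  have hA : (PySem.Int.ofChars? (PySem.List.sorted (PySem.Int.toChars (m : Int)) (fun c => c) false)).getD 0
      = ((e0*1000 + e1*100 + e2*10 + e3 : Nat) : Int) := by
    by_cases h1 : m < 10
    · have hpad : pvPad m = 3 := by simp [pvPad, h1]
      have hdig : pvDigits m = [0, 0, 0, m % 10] := by
        have z1 : m / 1000 % 10 = 0 := by omega
        have z2 : m / 100 % 10 = 0 := by omega
        have z3 : m / 10 % 10 = 0 := by omega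
        simp [pvDigits, z1, z2, z3]
      have hs1 : PySem.List.sorted [m % 10] (fun x : Nat => x) false = [m % 10] :=
        PySem.List.sorted_id_eq_of_perm_of_pairwise _ _ (List.Perm.refl _) (by simp)
      have hsasc : pvSorted m = [0, 0, 0, m % 10] := by
        rw [pvSorted, hdig]
        exact PySem.List.sorted_id_eq_of_perm_of_pairwise _ _ (List.Perm.refl _)
          (by simp [List.pairwise_cons])
      have he : e0 = 0 ∧ e1 = 0 ∧ e2 = 0 ∧ e3 = m % 10 := by
        rw [hes] at hsasc; simpa using hsasc
      obtain ⟨k0, k1, k2, k3⟩ := he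
      have hp := pvAsc1_holds (m % 10) (by omega)
      rw [pvAsc1] at hp
      have mm : m % 10 % 10 = m % 10 := by omega
      rw [mm] at hp
      simp only [beq_iff_eq] at hp
      rw [hascfold, hpad, hdig]
      simp only [List.drop, hs1, hp]
      simp only [Option.getD_some]
      congr 1
      omega
    · by_cases h2 : m < 100
      · -- two digits
        have hpad : pvPad m = 2 := by simp [pvPad, h1, h2]
        have z1 : m / 1000 % 10 = 0 := by omega
        have z2 : m / 100 % 10 = 0 := by omega
        have hdig : pvDigits m = [0, 0, m / 10 % 10, m % 10] := by simp [pvDigits, z1, z2]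
        have hlen2 : (PySem.List.sorted [m / 10 % 10, m % 10] (fun x : Nat => x) false).length = 2 := by
          rw [PySem.List.length_sorted]; rfl
        obtain ⟨s0, s1, hs⟩ : ∃ s0 s1,
            PySem.List.sorted [m / 10 % 10, m % 10] (fun x : Nat => x) false = [s0, s1] := by
          rcases hL : PySem.List.sorted [m / 10 % 10, m % 10] (fun x : Nat => x) false with
            _|⟨x0,_|⟨x1,_|⟨x2,r⟩⟩⟩ <;> rw [hL] at hlen2 <;> simp at hlen2
          exact ⟨x0, x1, rfl⟩
        have hserm : ([s0, s1] : List Nat).Perm [m / 10 % 10, m % 10] := hs ▸ PySem.List.sorted_perm _ _ _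
        have hsb : s0 < 10 ∧ s1 < 10 := by
          have h0 := hserm.mem_iff.mp (show s0 ∈ [s0, s1] by simp)
          have h1' := hserm.mem_iff.mp (show s1 ∈ [s0, s1] by simp)
          simp at h0 h1'
          constructor <;> omega
        have hsc : s0 ≤ s1 := by
          have hp := PySem.List.sorted_pairwise [m / 10 % 10, m % 10] (fun x : Nat => x)
          rw [hs] at hp
          simpa using hp
        have hsasc : pvSorted m = [0, 0, s0, s1] := by
          rw [pvSorted, hdig]
          apply PySem.List.sorted_id_eq_of_perm_of_pairwise
          · exact (hserm.cons 0).cons 0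
          · simp [List.pairwise_cons]; omega
        have he : e0 = 0 ∧ e1 = 0 ∧ e2 = s0 ∧ e3 = s1 := by
          rw [hes] at hsasc; simpa using hsasc
        obtain ⟨k0, k1, k2, k3⟩ := he
        have hp := pvAsc2_holds (s0 * 10 + s1) (by omega)
        rw [pvAsc2] at hp
        have d1 : (s0 * 10 + s1) / 10 % 10 = s0 := by omega
        have d2 : (s0 * 10 + s1) % 10 = s1 := by omega
        rw [d1, d2] at hp
        simp only [hsc, decide_true, Bool.not_true, Bool.false_or, beq_iff_eq] at hp
        rw [hascfold, hpad, hdig]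
        simp only [List.drop, hs, hp]
        simp only [Option.getD_some]
        congr 1
        omega
      · by_cases h3 : m < 1000
        · -- three digits
          have hpad : pvPad m = 1 := by simp [pvPad, h1, h2, h3]
          have z1 : m / 1000 % 10 = 0 := by omega
          have hdig : pvDigits m = [0, m / 100 % 10, m / 10 % 10, m % 10] := by simp [pvDigits, z1]
          have hlen3 : (PySem.List.sorted [m / 100 % 10, m / 10 % 10, m % 10]
              (fun x : Nat => x) false).length = 3 := by
            rw [PySem.List.length_sorted]; rfl
          obtain ⟨s0, s1, s2, hs⟩ : ∃ s0 s1 s2,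
              PySem.List.sorted [m / 100 % 10, m / 10 % 10, m % 10] (fun x : Nat => x) false
                = [s0, s1, s2] := by
            rcases hL : PySem.List.sorted [m / 100 % 10, m / 10 % 10, m % 10]
                (fun x : Nat => x) false with _|⟨x0,_|⟨x1,_|⟨x2,_|⟨x3,r⟩⟩⟩⟩ <;>
              rw [hL] at hlen3 <;> simp at hlen3
            exact ⟨x0, x1, x2, rfl⟩
          have hserm : ([s0, s1, s2] : List Nat).Perm [m / 100 % 10, m / 10 % 10, m % 10] :=
            hs ▸ PySem.List.sorted_perm _ _ _
          have hsb : s0 < 10 ∧ s1 < 10 ∧ s2 < 10 := by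
            have h0 := hserm.mem_iff.mp (show s0 ∈ [s0, s1, s2] by simp)
            have h1' := hserm.mem_iff.mp (show s1 ∈ [s0, s1, s2] by simp)
            have h2' := hserm.mem_iff.mp (show s2 ∈ [s0, s1, s2] by simp)
            simp at h0 h1' h2'
            refine ⟨by omega, by omega, by omega⟩
          have hsc : s0 ≤ s1 ∧ s1 ≤ s2 := by
            have hp := PySem.List.sorted_pairwise [m / 100 % 10, m / 10 % 10, m % 10]
              (fun x : Nat => x)
            rw [hs] at hp
            simp [List.pairwise_cons] at hp
            omega
          have hsasc : pvSorted m = [0, s0, s1, s2] := by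
            rw [pvSorted, hdig]
            apply PySem.List.sorted_id_eq_of_perm_of_pairwise
            · exact hserm.cons 0
            · simp [List.pairwise_cons]; omega
          have he : e0 = 0 ∧ e1 = s0 ∧ e2 = s1 ∧ e3 = s2 := by
            rw [hes] at hsasc; simpa using hsasc
          obtain ⟨k0, k1, k2, k3⟩ := he
          have hp := pvAsc3_holds (s0 * 100 + s1 * 10 + s2) (by omega)
          rw [pvAsc3] at hp
          have d1 : (s0 * 100 + s1 * 10 + s2) / 100 % 10 = s0 := by omega
          have d2 : (s0 * 100 + s1 * 10 + s2) / 10 % 10 = s1 := by omega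
          have d3 : (s0 * 100 + s1 * 10 + s2) % 10 = s2 := by omega
          rw [d1, d2, d3] at hp
          simp only [hsc.1, hsc.2, decide_true, Bool.and_true, Bool.not_true, Bool.false_or,
            beq_iff_eq] at hp
          rw [hascfold, hpad, hdig]
          simp only [List.drop, hs, hp]
          simp only [Option.getD_some]
          congr 1
          omega
        · -- four digits
          have hpad : pvPad m = 0 := by simp [pvPad, h1, h2, h3]
          have hp := pvAsc4_holds (e0 * 1000 + e1 * 100 + e2 * 10 + e3) (by omega)
          rw [pvAsc4] at hp
          obtain ⟨d1, d2, d3, d4⟩ := pvDigits_of_bounds e0 e1 e2 e3 he0 he1 he2 he3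
          simp only [pvDigits] at hp
          rw [d1, d2, d3, d4] at hp
          simp only [g01, g12, g23, decide_true, Bool.and_true, Bool.not_true, Bool.false_or,
            beq_iff_eq] at hp
          rw [hascfold, hpad, List.drop_zero, ← pvSorted, hes, hp]
          simp only [Option.getD_some]
  -- zfill characterization
  have hZ : PySem.Chars.zfill (PySem.Int.toChars (m : Int)) 4 = (pvDigits m).map Nat.digitChar := by
    rw [hT]
    by_cases h1 : m < 10
    · have hpad : pvPad m = 3 := by simp [pvPad, h1]
      have z1 : m / 1000 % 10 = 0 := by omega
      have z2 : m / 100 % 10 = 0 := by omega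
      have z3 : m / 10 % 10 = 0 := by omega
      have hsign := pvDigitChar_ne_sign (m % 10) (by omega)
      rw [hpad]
      simp [pvDigits, z1, z2, z3, PySem.Chars.zfill, hsign.1, hsign.2,
        List.replicate]
      decide
    · by_cases h2 : m < 100
      · have hpad : pvPad m = 2 := by simp [pvPad, h1, h2]
        have z1 : m / 1000 % 10 = 0 := by omega
        have z2 : m / 100 % 10 = 0 := by omega
        have hsign := pvDigitChar_ne_sign (m / 10 % 10) (by omega)
        rw [hpad]
        simp [pvDigits, z1, z2, PySem.Chars.zfill, hsign.1, hsign.2,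
          List.replicate]
        decide
      · by_cases h3 : m < 1000
        · have hpad : pvPad m = 1 := by simp [pvPad, h1, h2, h3]
          have z1 : m / 1000 % 10 = 0 := by omega
          have hsign := pvDigitChar_ne_sign (m / 100 % 10) (by omega)
          rw [hpad]
          simp [pvDigits, z1, PySem.Chars.zfill, hsign.1, hsign.2]
          decide
        · have hpad : pvPad m = 0 := by simp [pvPad, h1, h2, h3]
          rw [hpad]
          simp [pvDigits, PySem.Chars.zfill]
  -- the descending parse of A
  have hstepA : stepA (m : Int)
      = ((e3*1000 + e2*100 + e1*10 + e0 : Nat) : Int) - ((e0*1000 + e1*100 + e2*10 + e3 : Nat) : Int) := by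
    unfold stepA
    rw [hZ,
      pvSorted_map_comm Nat.digitChar (pvDigits m) true
        (fun x hx y hy => pvDigitChar_lt x (hd x hx) y (hd y hy)),
      hrev, hparseD, hA]
    simp
  -- B's side
  have b1 : PySem.Int.mod (PySem.Int.floordiv (m : Int) 1000) 10 = ((m / 1000 % 10 : Nat) : Int) := by
    rw [PySem.Int.floordiv_eq_ediv_of_pos (by norm_num), PySem.Int.mod_eq_emod_of_pos (by norm_num)]
    omega
  have b2 : PySem.Int.mod (PySem.Int.floordiv (m : Int) 100) 10 = ((m / 100 % 10 : Nat) : Int) := by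
    rw [PySem.Int.floordiv_eq_ediv_of_pos (by norm_num), PySem.Int.mod_eq_emod_of_pos (by norm_num)]
    omega
  have b3 : PySem.Int.mod (PySem.Int.floordiv (m : Int) 10) 10 = ((m / 10 % 10 : Nat) : Int) := by
    rw [PySem.Int.floordiv_eq_ediv_of_pos (by norm_num), PySem.Int.mod_eq_emod_of_pos (by norm_num)]
    omega
  have b4 : PySem.Int.mod (m : Int) 10 = ((m % 10 : Nat) : Int) := by
    rw [PySem.Int.mod_eq_emod_of_pos (by norm_num)]
    omega
  have hlist : [PySem.Int.mod (PySem.Int.floordiv (m : Int) 1000) 10,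
                PySem.Int.mod (PySem.Int.floordiv (m : Int) 100) 10,
                PySem.Int.mod (PySem.Int.floordiv (m : Int) 10) 10,
                PySem.Int.mod (m : Int) 10]
      = (pvDigits m).map (fun x : Nat => (x : Int)) := by
    rw [b1, b2, b3, b4]; simp [pvDigits]
  have hsortB : PySem.List.sorted ((pvDigits m).map (fun x : Nat => (x : Int))) (fun x => x) false
      = [(e0 : Int), (e1 : Int), (e2 : Int), (e3 : Int)] := by
    rw [pvSorted_map_comm (fun x : Nat => (x : Int)) (pvDigits m) false
      (fun x _ y _ => Nat.cast_lt), ← pvSorted, hes]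
    rfl
  have hstepB : stepB (m : Int)
      = ((e3 : Int)*1000 + (e2 : Int)*100 + (e1 : Int)*10 + (e0 : Int))
        - ((e0 : Int)*1000 + (e1 : Int)*100 + (e2 : Int)*10 + (e3 : Int)) := by
    unfold stepB
    rw [hlist, hsortB]
    simp [PySem.List.pyGetD]
  refine ⟨?_, ?_, ?_⟩
  · rw [hstepA, hstepB]
    push_cast
    ring
  · rw [hstepB]
    have : (e0 : Int) ≤ e1 ∧ (e1 : Int) ≤ e2 ∧ (e2 : Int) ≤ e3 := by
      constructor
      · exact_mod_cast g01
      constructor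
      · exact_mod_cast g12
      · exact_mod_cast g23
    omega
  · rw [hstepB]
    have h3' : (e3 : Int) < 10 := by exact_mod_cast he3
    omega

theorem pvLoop_eq : ∀ (fuel : Nat) (n c : Int), 0 ≤ n → n < 10000 →
    kapA fuel n + c = loopB fuel n c := by
  intro fuel
  induction fuel with
  | zero => intro n c _ _; simp [kapA, loopB]
  | succ f ih =>
    intro n c h0 h1
    rw [kapA_succ, loopB_succ]
    by_cases hk : n = KAPREKAR_CONSTANT
    · simp [hk]
    · simp only [hk, if_false]
      obtain ⟨m, rfl⟩ : ∃ m : Nat, n = (m : Int) := ⟨n.toNat, (Int.toNat_of_nonneg h0).symm⟩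
      have hm : m < 10000 := by exact_mod_cast h1
      obtain ⟨hAB, hs0, hs1⟩ := pvStep_eq m hm
      rw [hAB, ← ih (stepB (m : Int)) (c + 1) hs0 hs1]
      ring

-- ===== VERDICT =====
theorem num_kaprekar_iterations_spec : Claim_equal_num_kaprekar_iterations := by
  intro n _ hpre
  obtain ⟨h0, h1, _⟩ := hpre
  unfold Spec_num_kaprekar_iterations num_kaprekar_iterations num_kaprekar_iterations_alt
  have := pvLoop_eq 8 n 0 h0 (by omega)
  omega
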